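-- pv_equiv track=rewrite | github.com/Simba256/Competitive-Programming | AdventOfCode/2023/1/Day1.py | find_number_at_index
-- ===== SOURCE A (Python) =====
-- def find_number_at_index(input_string, start_index):
--     number_dict = {
--         'zero': 0,
--         'one': 1,
--         'two': 2,
--         'three': 3,
--         'four': 4,
--         'five': 5,
--         'six': 6,
--         'seven': 7,
--         'eight': 8,
--         'nine': 9
--     }
--
--     # Iterate over the number_dict to check if any number starts at the given index
--     for word, value in number_dict.items():
--         if input_string.lower().startswith(word, start_index):
--             return value
--
--     # If no number is found, return None
--     return None
-- ===== SOURCE B (Python) =====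
-- def find_number_at_index(input_string, start_index):
--     number_dict = {
--         'zero': 0,
--         'one': 1,
--         'two': 2,
--         'three': 3,
--         'four': 4,
--         'five': 5,
--         'six': 6,
--         'seven': 7,
--         'eight': 8,
--         'nine': 9
--     }
--     tail = input_string.lower()[start_index:]
--     for length in (3, 4, 5):
--         value = number_dict.get(tail[:length])
--         if value is not None:
--             return value
--     return None
-- ===== Notes on version B (the rewrite author's own statement) =====
-- stated objective: simpler
-- what changed: B lowercases once, takes the tail slice at start_index, and does one dict lookup per possible word length (3, 4, 5) on the tail's prefix, instead of A's scan over all ten words calling lower() and startswith for each.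
import Mathlib
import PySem

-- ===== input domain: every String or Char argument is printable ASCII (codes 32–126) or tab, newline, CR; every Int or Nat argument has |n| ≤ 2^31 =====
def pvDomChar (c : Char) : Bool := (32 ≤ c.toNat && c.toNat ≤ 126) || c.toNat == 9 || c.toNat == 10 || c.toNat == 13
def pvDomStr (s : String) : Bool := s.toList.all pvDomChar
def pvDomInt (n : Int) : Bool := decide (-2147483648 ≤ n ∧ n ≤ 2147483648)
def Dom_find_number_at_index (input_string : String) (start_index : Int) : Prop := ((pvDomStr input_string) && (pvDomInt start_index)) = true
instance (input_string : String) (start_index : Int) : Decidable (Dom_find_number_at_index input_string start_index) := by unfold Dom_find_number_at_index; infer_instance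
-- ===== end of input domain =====

-- B lowercases once, takes the tail slice at start_index, and probes the dict with the tail's 3/4/5-char prefixes instead of scanning all ten words with startswith.

-- ===== PORT A =====
-- hand port of Python str.startswith(word, start): exact — start is normalized like a
-- slice start (negative counts from the end, clamped), then word must match there
def pyStartswithFrom (s w : List Char) (start : Int) : Bool :=
  w.isPrefixOf (s.drop (PySem.List.clampIdx s.length start))

def pvNumWords : List (List Char × Int) :=
  [(['z','e','r','o'], 0), (['o','n','e'], 1), (['t','w','o'], 2), (['t','h','r','e','e'], 3),
   (['f','o','u','r'], 4), (['f','i','v','e'], 5), (['s','i','x'], 6), (['s','e','v','e','n'], 7),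
   (['e','i','g','h','t'], 8), (['n','i','n','e'], 9)]

def pvLoopA (s : List Char) (start : Int) : List (List Char × Int) → Option Int
  | [] => none
  | (w, v) :: rest =>
    if pyStartswithFrom (PySem.Chars.lower s) w start then some v else pvLoopA s start rest

def find_number_at_index (input_string : String) (start_index : Int) : Option Int :=
  pvLoopA input_string.toList start_index pvNumWords

-- ===== PORT B =====
def pvNumDict : PySem.Dict (List Char) Int := PySem.Dict.ofList pvNumWords

def pvLoopB (tail : List Char) : List Int → Option Int
  | [] => none
  | L :: rest =>
    match PySem.Dict.get? pvNumDict (PySem.List.slice tail none (some L)) with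
    | some v => some v
    | none => pvLoopB tail rest

def find_number_at_index_alt (input_string : String) (start_index : Int) : Option Int :=
  let tail := PySem.List.slice (PySem.Chars.lower input_string.toList) (some start_index) none
  pvLoopB tail [3, 4, 5]

-- ===== PRECONDITION & SPEC =====
def Spec_find_number_at_index (input_string : String) (start_index : Int) (out : Option Int) : Prop := out = find_number_at_index_alt input_string start_index
instance (input_string : String) (start_index : Int) (out : Option Int) : Decidable (Spec_find_number_at_index input_string start_index out) := by unfold Spec_find_number_at_index; infer_instance

-- ===== CLAIM (what is proved, stated in full; the proofs are below) =====
def Claim_equal_find_number_at_index : Prop := ∀ (input_string : String) (start_index : Int), Dom_find_number_at_index input_string start_index → Spec_find_number_at_index input_string start_index (find_number_at_index input_string start_index)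

-- ===== LEMMAS AND PROOFS =====

-- A's loop, with the common suffix of the lowered string factored out
def chainA (r : List Char) : List (List Char × Int) → Option Int
  | [] => none
  | (w, v) :: rest => if w.isPrefixOf r then some v else chainA r rest

lemma pvLoopA_eq_chainA (s : List Char) (k : Int) (ws : List (List Char × Int)) :
    pvLoopA s k ws =
      chainA ((PySem.Chars.lower s).drop
        (PySem.List.clampIdx (PySem.Chars.lower s).length k)) ws := by
  induction ws with
  | nil => rfl
  | cons p rest ih =>
    obtain ⟨w, v⟩ := p
    simp [pvLoopA, chainA, pyStartswithFrom, ih]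

lemma pv_beq_take_self (w r : List Char) : (w == List.take w.length r) = w.isPrefixOf r := by
  rw [Bool.eq_iff_iff]
  simp only [beq_iff_eq, List.isPrefixOf_iff_prefix]
  exact (List.prefix_iff_eq_take).symm

lemma pv_beq_take_long (w r : List Char) (L : Nat) (h : L < w.length) : (w == List.take L r) = false := by
  rw [Bool.eq_false_iff]
  intro hb
  have he := (beq_iff_eq).mp hb
  have : w.length ≤ L := by
    have := congrArg List.length he
    simp [List.length_take] at this
    omega
  omega

lemma pv_beq_take_short (w r : List Char) (L : Nat) (hp : w.isPrefixOf r = false) : (w == List.take L r) = false := by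
  rw [Bool.eq_false_iff]
  intro hb
  have he := (beq_iff_eq).mp hb
  have hpre : w <+: r := he ▸ List.take_prefix L r
  rw [← List.isPrefixOf_iff_prefix] at hpre
  simp [hpre] at hp

lemma pv_excl (w₁ w₂ r : List Char) (h : w₁.isPrefixOf r = true) (h12 : ¬ w₁ <+: w₂) (h21 : ¬ w₂ <+: w₁) :
    w₂.isPrefixOf r = false := by
  rw [List.isPrefixOf_iff_prefix] at h
  rw [Bool.eq_false_iff, Ne, List.isPrefixOf_iff_prefix]
  intro h2
  rcases List.prefix_or_prefix_of_prefix h h2 with hc | hc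
  · exact h12 hc
  · exact h21 hc

lemma pv_mk_nil_get? (x : List Char) : (PySem.Dict.mk ([] : List (List Char × Int))).get? x = none := by
  simp [PySem.Dict.get?]

lemma pv_dict_eq : pvNumDict = PySem.Dict.mk pvNumWords := by decide

-- the heart: A's ten startswith checks and B's three by-length lookups agree on every suffix
lemma pv_core (r : List Char) :
    chainA r pvNumWords =
      (match PySem.Dict.get? pvNumDict (r.take 3) with
       | some v => some v
       | none =>
         match PySem.Dict.get? pvNumDict (r.take 4) with
         | some v => some v
         | none =>
           match PySem.Dict.get? pvNumDict (r.take 5) with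
           | some v => some v
           | none => none) := by
  rw [pv_dict_eq]
  simp only [chainA, pvNumWords, PySem.Dict.get?_mk_cons, pv_mk_nil_get?]
  have hl0_3 : (['z','e','r','o'] == List.take 3 r) = false := pv_beq_take_long ['z','e','r','o'] r 3 (by decide)
  have hl3_3 : (['t','h','r','e','e'] == List.take 3 r) = false := pv_beq_take_long ['t','h','r','e','e'] r 3 (by decide)
  have hl3_4 : (['t','h','r','e','e'] == List.take 4 r) = false := pv_beq_take_long ['t','h','r','e','e'] r 4 (by decide)
  have hl4_3 : (['f','o','u','r'] == List.take 3 r) = false := pv_beq_take_long ['f','o','u','r'] r 3 (by decide)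
  have hl5_3 : (['f','i','v','e'] == List.take 3 r) = false := pv_beq_take_long ['f','i','v','e'] r 3 (by decide)
  have hl7_3 : (['s','e','v','e','n'] == List.take 3 r) = false := pv_beq_take_long ['s','e','v','e','n'] r 3 (by decide)
  have hl7_4 : (['s','e','v','e','n'] == List.take 4 r) = false := pv_beq_take_long ['s','e','v','e','n'] r 4 (by decide)
  have hl8_3 : (['e','i','g','h','t'] == List.take 3 r) = false := pv_beq_take_long ['e','i','g','h','t'] r 3 (by decide)
  have hl8_4 : (['e','i','g','h','t'] == List.take 4 r) = false := pv_beq_take_long ['e','i','g','h','t'] r 4 (by decide)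
  have hl9_3 : (['n','i','n','e'] == List.take 3 r) = false := pv_beq_take_long ['n','i','n','e'] r 3 (by decide)
  have hs0 : (['z','e','r','o'] == List.take 4 r) = (['z','e','r','o'].isPrefixOf r) := pv_beq_take_self ['z','e','r','o'] r
  have hs1 : (['o','n','e'] == List.take 3 r) = (['o','n','e'].isPrefixOf r) := pv_beq_take_self ['o','n','e'] r
  have hs2 : (['t','w','o'] == List.take 3 r) = (['t','w','o'].isPrefixOf r) := pv_beq_take_self ['t','w','o'] r
  have hs3 : (['t','h','r','e','e'] == List.take 5 r) = (['t','h','r','e','e'].isPrefixOf r) := pv_beq_take_self ['t','h','r','e','e'] r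
  have hs4 : (['f','o','u','r'] == List.take 4 r) = (['f','o','u','r'].isPrefixOf r) := pv_beq_take_self ['f','o','u','r'] r
  have hs5 : (['f','i','v','e'] == List.take 4 r) = (['f','i','v','e'].isPrefixOf r) := pv_beq_take_self ['f','i','v','e'] r
  have hs6 : (['s','i','x'] == List.take 3 r) = (['s','i','x'].isPrefixOf r) := pv_beq_take_self ['s','i','x'] r
  have hs7 : (['s','e','v','e','n'] == List.take 5 r) = (['s','e','v','e','n'].isPrefixOf r) := pv_beq_take_self ['s','e','v','e','n'] r
  have hs8 : (['e','i','g','h','t'] == List.take 5 r) = (['e','i','g','h','t'].isPrefixOf r) := pv_beq_take_self ['e','i','g','h','t'] r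
  have hs9 : (['n','i','n','e'] == List.take 4 r) = (['n','i','n','e'].isPrefixOf r) := pv_beq_take_self ['n','i','n','e'] r
  simp only [hl0_3, hl3_3, hl3_4, hl4_3, hl5_3, hl7_3, hl7_4, hl8_3, hl8_4, hl9_3, hs0, hs1, hs2, hs3, hs4, hs5, hs6, hs7, hs8, hs9]
  by_cases h0 : (['z','e','r','o'].isPrefixOf r) = true
  ·
    have hf1 : (['o','n','e'].isPrefixOf r) = false := pv_excl ['z','e','r','o'] ['o','n','e'] r h0 (by decide) (by decide)
    have hf2 : (['t','w','o'].isPrefixOf r) = false := pv_excl ['z','e','r','o'] ['t','w','o'] r h0 (by decide) (by decide)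
    have hf3 : (['t','h','r','e','e'].isPrefixOf r) = false := pv_excl ['z','e','r','o'] ['t','h','r','e','e'] r h0 (by decide) (by decide)
    have hf4 : (['f','o','u','r'].isPrefixOf r) = false := pv_excl ['z','e','r','o'] ['f','o','u','r'] r h0 (by decide) (by decide)
    have hf5 : (['f','i','v','e'].isPrefixOf r) = false := pv_excl ['z','e','r','o'] ['f','i','v','e'] r h0 (by decide) (by decide)
    have hf6 : (['s','i','x'].isPrefixOf r) = false := pv_excl ['z','e','r','o'] ['s','i','x'] r h0 (by decide) (by decide)
    have hf7 : (['s','e','v','e','n'].isPrefixOf r) = false := pv_excl ['z','e','r','o'] ['s','e','v','e','n'] r h0 (by decide) (by decide)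
    have hf8 : (['e','i','g','h','t'].isPrefixOf r) = false := pv_excl ['z','e','r','o'] ['e','i','g','h','t'] r h0 (by decide) (by decide)
    have hf9 : (['n','i','n','e'].isPrefixOf r) = false := pv_excl ['z','e','r','o'] ['n','i','n','e'] r h0 (by decide) (by decide)
    have hc1_4 : (['o','n','e'] == List.take 4 r) = false := pv_beq_take_short ['o','n','e'] r 4 hf1
    have hc1_5 : (['o','n','e'] == List.take 5 r) = false := pv_beq_take_short ['o','n','e'] r 5 hf1
    have hc2_4 : (['t','w','o'] == List.take 4 r) = false := pv_beq_take_short ['t','w','o'] r 4 hf2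
    have hc2_5 : (['t','w','o'] == List.take 5 r) = false := pv_beq_take_short ['t','w','o'] r 5 hf2
    have hc4_5 : (['f','o','u','r'] == List.take 5 r) = false := pv_beq_take_short ['f','o','u','r'] r 5 hf4
    have hc5_5 : (['f','i','v','e'] == List.take 5 r) = false := pv_beq_take_short ['f','i','v','e'] r 5 hf5
    have hc6_4 : (['s','i','x'] == List.take 4 r) = false := pv_beq_take_short ['s','i','x'] r 4 hf6
    have hc6_5 : (['s','i','x'] == List.take 5 r) = false := pv_beq_take_short ['s','i','x'] r 5 hf6
    have hc9_5 : (['n','i','n','e'] == List.take 5 r) = false := pv_beq_take_short ['n','i','n','e'] r 5 hf9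
    simp [h0, hf1, hf2, hf3, hf4, hf5, hf6, hf7, hf8, hf9, hc1_4, hc1_5, hc2_4, hc2_5, hc4_5, hc5_5, hc6_4, hc6_5, hc9_5]
  by_cases h1 : (['o','n','e'].isPrefixOf r) = true
  ·
    have hf0 : (['z','e','r','o'].isPrefixOf r) = false := pv_excl ['o','n','e'] ['z','e','r','o'] r h1 (by decide) (by decide)
    have hf2 : (['t','w','o'].isPrefixOf r) = false := pv_excl ['o','n','e'] ['t','w','o'] r h1 (by decide) (by decide)
    have hf3 : (['t','h','r','e','e'].isPrefixOf r) = false := pv_excl ['o','n','e'] ['t','h','r','e','e'] r h1 (by decide) (by decide)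
    have hf4 : (['f','o','u','r'].isPrefixOf r) = false := pv_excl ['o','n','e'] ['f','o','u','r'] r h1 (by decide) (by decide)
    have hf5 : (['f','i','v','e'].isPrefixOf r) = false := pv_excl ['o','n','e'] ['f','i','v','e'] r h1 (by decide) (by decide)
    have hf6 : (['s','i','x'].isPrefixOf r) = false := pv_excl ['o','n','e'] ['s','i','x'] r h1 (by decide) (by decide)
    have hf7 : (['s','e','v','e','n'].isPrefixOf r) = false := pv_excl ['o','n','e'] ['s','e','v','e','n'] r h1 (by decide) (by decide)
    have hf8 : (['e','i','g','h','t'].isPrefixOf r) = false := pv_excl ['o','n','e'] ['e','i','g','h','t'] r h1 (by decide) (by decide)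
    have hf9 : (['n','i','n','e'].isPrefixOf r) = false := pv_excl ['o','n','e'] ['n','i','n','e'] r h1 (by decide) (by decide)
    have hc0_5 : (['z','e','r','o'] == List.take 5 r) = false := pv_beq_take_short ['z','e','r','o'] r 5 hf0
    have hc2_4 : (['t','w','o'] == List.take 4 r) = false := pv_beq_take_short ['t','w','o'] r 4 hf2
    have hc2_5 : (['t','w','o'] == List.take 5 r) = false := pv_beq_take_short ['t','w','o'] r 5 hf2
    have hc4_5 : (['f','o','u','r'] == List.take 5 r) = false := pv_beq_take_short ['f','o','u','r'] r 5 hf4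
    have hc5_5 : (['f','i','v','e'] == List.take 5 r) = false := pv_beq_take_short ['f','i','v','e'] r 5 hf5
    have hc6_4 : (['s','i','x'] == List.take 4 r) = false := pv_beq_take_short ['s','i','x'] r 4 hf6
    have hc6_5 : (['s','i','x'] == List.take 5 r) = false := pv_beq_take_short ['s','i','x'] r 5 hf6
    have hc9_5 : (['n','i','n','e'] == List.take 5 r) = false := pv_beq_take_short ['n','i','n','e'] r 5 hf9
    simp [h1, hf0, hf2, hf3, hf4, hf5, hf6, hf7, hf8, hf9, hc0_5, hc2_4, hc2_5, hc4_5, hc5_5, hc6_4, hc6_5, hc9_5]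
  by_cases h2 : (['t','w','o'].isPrefixOf r) = true
  ·
    have hf0 : (['z','e','r','o'].isPrefixOf r) = false := pv_excl ['t','w','o'] ['z','e','r','o'] r h2 (by decide) (by decide)
    have hf1 : (['o','n','e'].isPrefixOf r) = false := pv_excl ['t','w','o'] ['o','n','e'] r h2 (by decide) (by decide)
    have hf3 : (['t','h','r','e','e'].isPrefixOf r) = false := pv_excl ['t','w','o'] ['t','h','r','e','e'] r h2 (by decide) (by decide)
    have hf4 : (['f','o','u','r'].isPrefixOf r) = false := pv_excl ['t','w','o'] ['f','o','u','r'] r h2 (by decide) (by decide)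
    have hf5 : (['f','i','v','e'].isPrefixOf r) = false := pv_excl ['t','w','o'] ['f','i','v','e'] r h2 (by decide) (by decide)
    have hf6 : (['s','i','x'].isPrefixOf r) = false := pv_excl ['t','w','o'] ['s','i','x'] r h2 (by decide) (by decide)
    have hf7 : (['s','e','v','e','n'].isPrefixOf r) = false := pv_excl ['t','w','o'] ['s','e','v','e','n'] r h2 (by decide) (by decide)
    have hf8 : (['e','i','g','h','t'].isPrefixOf r) = false := pv_excl ['t','w','o'] ['e','i','g','h','t'] r h2 (by decide) (by decide)
    have hf9 : (['n','i','n','e'].isPrefixOf r) = false := pv_excl ['t','w','o'] ['n','i','n','e'] r h2 (by decide) (by decide)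
    have hc0_5 : (['z','e','r','o'] == List.take 5 r) = false := pv_beq_take_short ['z','e','r','o'] r 5 hf0
    have hc1_4 : (['o','n','e'] == List.take 4 r) = false := pv_beq_take_short ['o','n','e'] r 4 hf1
    have hc1_5 : (['o','n','e'] == List.take 5 r) = false := pv_beq_take_short ['o','n','e'] r 5 hf1
    have hc4_5 : (['f','o','u','r'] == List.take 5 r) = false := pv_beq_take_short ['f','o','u','r'] r 5 hf4
    have hc5_5 : (['f','i','v','e'] == List.take 5 r) = false := pv_beq_take_short ['f','i','v','e'] r 5 hf5
    have hc6_4 : (['s','i','x'] == List.take 4 r) = false := pv_beq_take_short ['s','i','x'] r 4 hf6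
    have hc6_5 : (['s','i','x'] == List.take 5 r) = false := pv_beq_take_short ['s','i','x'] r 5 hf6
    have hc9_5 : (['n','i','n','e'] == List.take 5 r) = false := pv_beq_take_short ['n','i','n','e'] r 5 hf9
    simp [h2, hf0, hf1, hf3, hf4, hf5, hf6, hf7, hf8, hf9, hc0_5, hc1_4, hc1_5, hc4_5, hc5_5, hc6_4, hc6_5, hc9_5]
  by_cases h3 : (['t','h','r','e','e'].isPrefixOf r) = true
  ·
    have hf0 : (['z','e','r','o'].isPrefixOf r) = false := pv_excl ['t','h','r','e','e'] ['z','e','r','o'] r h3 (by decide) (by decide)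
    have hf1 : (['o','n','e'].isPrefixOf r) = false := pv_excl ['t','h','r','e','e'] ['o','n','e'] r h3 (by decide) (by decide)
    have hf2 : (['t','w','o'].isPrefixOf r) = false := pv_excl ['t','h','r','e','e'] ['t','w','o'] r h3 (by decide) (by decide)
    have hf4 : (['f','o','u','r'].isPrefixOf r) = false := pv_excl ['t','h','r','e','e'] ['f','o','u','r'] r h3 (by decide) (by decide)
    have hf5 : (['f','i','v','e'].isPrefixOf r) = false := pv_excl ['t','h','r','e','e'] ['f','i','v','e'] r h3 (by decide) (by decide)
    have hf6 : (['s','i','x'].isPrefixOf r) = false := pv_excl ['t','h','r','e','e'] ['s','i','x'] r h3 (by decide) (by decide)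
    have hf7 : (['s','e','v','e','n'].isPrefixOf r) = false := pv_excl ['t','h','r','e','e'] ['s','e','v','e','n'] r h3 (by decide) (by decide)
    have hf8 : (['e','i','g','h','t'].isPrefixOf r) = false := pv_excl ['t','h','r','e','e'] ['e','i','g','h','t'] r h3 (by decide) (by decide)
    have hf9 : (['n','i','n','e'].isPrefixOf r) = false := pv_excl ['t','h','r','e','e'] ['n','i','n','e'] r h3 (by decide) (by decide)
    have hc0_5 : (['z','e','r','o'] == List.take 5 r) = false := pv_beq_take_short ['z','e','r','o'] r 5 hf0
    have hc1_4 : (['o','n','e'] == List.take 4 r) = false := pv_beq_take_short ['o','n','e'] r 4 hf1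
    have hc1_5 : (['o','n','e'] == List.take 5 r) = false := pv_beq_take_short ['o','n','e'] r 5 hf1
    have hc2_4 : (['t','w','o'] == List.take 4 r) = false := pv_beq_take_short ['t','w','o'] r 4 hf2
    have hc2_5 : (['t','w','o'] == List.take 5 r) = false := pv_beq_take_short ['t','w','o'] r 5 hf2
    have hc4_5 : (['f','o','u','r'] == List.take 5 r) = false := pv_beq_take_short ['f','o','u','r'] r 5 hf4
    have hc5_5 : (['f','i','v','e'] == List.take 5 r) = false := pv_beq_take_short ['f','i','v','e'] r 5 hf5
    have hc6_4 : (['s','i','x'] == List.take 4 r) = false := pv_beq_take_short ['s','i','x'] r 4 hf6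
    have hc6_5 : (['s','i','x'] == List.take 5 r) = false := pv_beq_take_short ['s','i','x'] r 5 hf6
    have hc9_5 : (['n','i','n','e'] == List.take 5 r) = false := pv_beq_take_short ['n','i','n','e'] r 5 hf9
    simp [h3, hf0, hf1, hf2, hf4, hf5, hf6, hf7, hf8, hf9, hc0_5, hc1_4, hc1_5, hc2_4, hc2_5, hc4_5, hc5_5, hc6_4, hc6_5, hc9_5]
  by_cases h4 : (['f','o','u','r'].isPrefixOf r) = true
  ·
    have hf0 : (['z','e','r','o'].isPrefixOf r) = false := pv_excl ['f','o','u','r'] ['z','e','r','o'] r h4 (by decide) (by decide)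
    have hf1 : (['o','n','e'].isPrefixOf r) = false := pv_excl ['f','o','u','r'] ['o','n','e'] r h4 (by decide) (by decide)
    have hf2 : (['t','w','o'].isPrefixOf r) = false := pv_excl ['f','o','u','r'] ['t','w','o'] r h4 (by decide) (by decide)
    have hf3 : (['t','h','r','e','e'].isPrefixOf r) = false := pv_excl ['f','o','u','r'] ['t','h','r','e','e'] r h4 (by decide) (by decide)
    have hf5 : (['f','i','v','e'].isPrefixOf r) = false := pv_excl ['f','o','u','r'] ['f','i','v','e'] r h4 (by decide) (by decide)
    have hf6 : (['s','i','x'].isPrefixOf r) = false := pv_excl ['f','o','u','r'] ['s','i','x'] r h4 (by decide) (by decide)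
    have hf7 : (['s','e','v','e','n'].isPrefixOf r) = false := pv_excl ['f','o','u','r'] ['s','e','v','e','n'] r h4 (by decide) (by decide)
    have hf8 : (['e','i','g','h','t'].isPrefixOf r) = false := pv_excl ['f','o','u','r'] ['e','i','g','h','t'] r h4 (by decide) (by decide)
    have hf9 : (['n','i','n','e'].isPrefixOf r) = false := pv_excl ['f','o','u','r'] ['n','i','n','e'] r h4 (by decide) (by decide)
    have hc0_5 : (['z','e','r','o'] == List.take 5 r) = false := pv_beq_take_short ['z','e','r','o'] r 5 hf0
    have hc1_4 : (['o','n','e'] == List.take 4 r) = false := pv_beq_take_short ['o','n','e'] r 4 hf1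
    have hc1_5 : (['o','n','e'] == List.take 5 r) = false := pv_beq_take_short ['o','n','e'] r 5 hf1
    have hc2_4 : (['t','w','o'] == List.take 4 r) = false := pv_beq_take_short ['t','w','o'] r 4 hf2
    have hc2_5 : (['t','w','o'] == List.take 5 r) = false := pv_beq_take_short ['t','w','o'] r 5 hf2
    have hc5_5 : (['f','i','v','e'] == List.take 5 r) = false := pv_beq_take_short ['f','i','v','e'] r 5 hf5
    have hc6_4 : (['s','i','x'] == List.take 4 r) = false := pv_beq_take_short ['s','i','x'] r 4 hf6
    have hc6_5 : (['s','i','x'] == List.take 5 r) = false := pv_beq_take_short ['s','i','x'] r 5 hf6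
    have hc9_5 : (['n','i','n','e'] == List.take 5 r) = false := pv_beq_take_short ['n','i','n','e'] r 5 hf9
    simp [h4, hf0, hf1, hf2, hf3, hf5, hf6, hf7, hf8, hf9, hc0_5, hc1_4, hc1_5, hc2_4, hc2_5, hc5_5, hc6_4, hc6_5, hc9_5]
  by_cases h5 : (['f','i','v','e'].isPrefixOf r) = true
  ·
    have hf0 : (['z','e','r','o'].isPrefixOf r) = false := pv_excl ['f','i','v','e'] ['z','e','r','o'] r h5 (by decide) (by decide)
    have hf1 : (['o','n','e'].isPrefixOf r) = false := pv_excl ['f','i','v','e'] ['o','n','e'] r h5 (by decide) (by decide)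
    have hf2 : (['t','w','o'].isPrefixOf r) = false := pv_excl ['f','i','v','e'] ['t','w','o'] r h5 (by decide) (by decide)
    have hf3 : (['t','h','r','e','e'].isPrefixOf r) = false := pv_excl ['f','i','v','e'] ['t','h','r','e','e'] r h5 (by decide) (by decide)
    have hf4 : (['f','o','u','r'].isPrefixOf r) = false := pv_excl ['f','i','v','e'] ['f','o','u','r'] r h5 (by decide) (by decide)
    have hf6 : (['s','i','x'].isPrefixOf r) = false := pv_excl ['f','i','v','e'] ['s','i','x'] r h5 (by decide) (by decide)
    have hf7 : (['s','e','v','e','n'].isPrefixOf r) = false := pv_excl ['f','i','v','e'] ['s','e','v','e','n'] r h5 (by decide) (by decide)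
    have hf8 : (['e','i','g','h','t'].isPrefixOf r) = false := pv_excl ['f','i','v','e'] ['e','i','g','h','t'] r h5 (by decide) (by decide)
    have hf9 : (['n','i','n','e'].isPrefixOf r) = false := pv_excl ['f','i','v','e'] ['n','i','n','e'] r h5 (by decide) (by decide)
    have hc0_5 : (['z','e','r','o'] == List.take 5 r) = false := pv_beq_take_short ['z','e','r','o'] r 5 hf0
    have hc1_4 : (['o','n','e'] == List.take 4 r) = false := pv_beq_take_short ['o','n','e'] r 4 hf1
    have hc1_5 : (['o','n','e'] == List.take 5 r) = false := pv_beq_take_short ['o','n','e'] r 5 hf1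
    have hc2_4 : (['t','w','o'] == List.take 4 r) = false := pv_beq_take_short ['t','w','o'] r 4 hf2
    have hc2_5 : (['t','w','o'] == List.take 5 r) = false := pv_beq_take_short ['t','w','o'] r 5 hf2
    have hc4_5 : (['f','o','u','r'] == List.take 5 r) = false := pv_beq_take_short ['f','o','u','r'] r 5 hf4
    have hc6_4 : (['s','i','x'] == List.take 4 r) = false := pv_beq_take_short ['s','i','x'] r 4 hf6
    have hc6_5 : (['s','i','x'] == List.take 5 r) = false := pv_beq_take_short ['s','i','x'] r 5 hf6
    have hc9_5 : (['n','i','n','e'] == List.take 5 r) = false := pv_beq_take_short ['n','i','n','e'] r 5 hf9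
    simp [h5, hf0, hf1, hf2, hf3, hf4, hf6, hf7, hf8, hf9, hc0_5, hc1_4, hc1_5, hc2_4, hc2_5, hc4_5, hc6_4, hc6_5, hc9_5]
  by_cases h6 : (['s','i','x'].isPrefixOf r) = true
  ·
    have hf0 : (['z','e','r','o'].isPrefixOf r) = false := pv_excl ['s','i','x'] ['z','e','r','o'] r h6 (by decide) (by decide)
    have hf1 : (['o','n','e'].isPrefixOf r) = false := pv_excl ['s','i','x'] ['o','n','e'] r h6 (by decide) (by decide)
    have hf2 : (['t','w','o'].isPrefixOf r) = false := pv_excl ['s','i','x'] ['t','w','o'] r h6 (by decide) (by decide)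
    have hf3 : (['t','h','r','e','e'].isPrefixOf r) = false := pv_excl ['s','i','x'] ['t','h','r','e','e'] r h6 (by decide) (by decide)
    have hf4 : (['f','o','u','r'].isPrefixOf r) = false := pv_excl ['s','i','x'] ['f','o','u','r'] r h6 (by decide) (by decide)
    have hf5 : (['f','i','v','e'].isPrefixOf r) = false := pv_excl ['s','i','x'] ['f','i','v','e'] r h6 (by decide) (by decide)
    have hf7 : (['s','e','v','e','n'].isPrefixOf r) = false := pv_excl ['s','i','x'] ['s','e','v','e','n'] r h6 (by decide) (by decide)
    have hf8 : (['e','i','g','h','t'].isPrefixOf r) = false := pv_excl ['s','i','x'] ['e','i','g','h','t'] r h6 (by decide) (by decide)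
    have hf9 : (['n','i','n','e'].isPrefixOf r) = false := pv_excl ['s','i','x'] ['n','i','n','e'] r h6 (by decide) (by decide)
    have hc0_5 : (['z','e','r','o'] == List.take 5 r) = false := pv_beq_take_short ['z','e','r','o'] r 5 hf0
    have hc1_4 : (['o','n','e'] == List.take 4 r) = false := pv_beq_take_short ['o','n','e'] r 4 hf1
    have hc1_5 : (['o','n','e'] == List.take 5 r) = false := pv_beq_take_short ['o','n','e'] r 5 hf1
    have hc2_4 : (['t','w','o'] == List.take 4 r) = false := pv_beq_take_short ['t','w','o'] r 4 hf2
    have hc2_5 : (['t','w','o'] == List.take 5 r) = false := pv_beq_take_short ['t','w','o'] r 5 hf2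
    have hc4_5 : (['f','o','u','r'] == List.take 5 r) = false := pv_beq_take_short ['f','o','u','r'] r 5 hf4
    have hc5_5 : (['f','i','v','e'] == List.take 5 r) = false := pv_beq_take_short ['f','i','v','e'] r 5 hf5
    have hc9_5 : (['n','i','n','e'] == List.take 5 r) = false := pv_beq_take_short ['n','i','n','e'] r 5 hf9
    simp [h6, hf0, hf1, hf2, hf3, hf4, hf5, hf7, hf8, hf9, hc0_5, hc1_4, hc1_5, hc2_4, hc2_5, hc4_5, hc5_5, hc9_5]
  by_cases h7 : (['s','e','v','e','n'].isPrefixOf r) = true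
  ·
    have hf0 : (['z','e','r','o'].isPrefixOf r) = false := pv_excl ['s','e','v','e','n'] ['z','e','r','o'] r h7 (by decide) (by decide)
    have hf1 : (['o','n','e'].isPrefixOf r) = false := pv_excl ['s','e','v','e','n'] ['o','n','e'] r h7 (by decide) (by decide)
    have hf2 : (['t','w','o'].isPrefixOf r) = false := pv_excl ['s','e','v','e','n'] ['t','w','o'] r h7 (by decide) (by decide)
    have hf3 : (['t','h','r','e','e'].isPrefixOf r) = false := pv_excl ['s','e','v','e','n'] ['t','h','r','e','e'] r h7 (by decide) (by decide)
    have hf4 : (['f','o','u','r'].isPrefixOf r) = false := pv_excl ['s','e','v','e','n'] ['f','o','u','r'] r h7 (by decide) (by decide)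
    have hf5 : (['f','i','v','e'].isPrefixOf r) = false := pv_excl ['s','e','v','e','n'] ['f','i','v','e'] r h7 (by decide) (by decide)
    have hf6 : (['s','i','x'].isPrefixOf r) = false := pv_excl ['s','e','v','e','n'] ['s','i','x'] r h7 (by decide) (by decide)
    have hf8 : (['e','i','g','h','t'].isPrefixOf r) = false := pv_excl ['s','e','v','e','n'] ['e','i','g','h','t'] r h7 (by decide) (by decide)
    have hf9 : (['n','i','n','e'].isPrefixOf r) = false := pv_excl ['s','e','v','e','n'] ['n','i','n','e'] r h7 (by decide) (by decide)
    have hc0_5 : (['z','e','r','o'] == List.take 5 r) = false := pv_beq_take_short ['z','e','r','o'] r 5 hf0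
    have hc1_4 : (['o','n','e'] == List.take 4 r) = false := pv_beq_take_short ['o','n','e'] r 4 hf1
    have hc1_5 : (['o','n','e'] == List.take 5 r) = false := pv_beq_take_short ['o','n','e'] r 5 hf1
    have hc2_4 : (['t','w','o'] == List.take 4 r) = false := pv_beq_take_short ['t','w','o'] r 4 hf2
    have hc2_5 : (['t','w','o'] == List.take 5 r) = false := pv_beq_take_short ['t','w','o'] r 5 hf2
    have hc4_5 : (['f','o','u','r'] == List.take 5 r) = false := pv_beq_take_short ['f','o','u','r'] r 5 hf4
    have hc5_5 : (['f','i','v','e'] == List.take 5 r) = false := pv_beq_take_short ['f','i','v','e'] r 5 hf5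
    have hc6_4 : (['s','i','x'] == List.take 4 r) = false := pv_beq_take_short ['s','i','x'] r 4 hf6
    have hc6_5 : (['s','i','x'] == List.take 5 r) = false := pv_beq_take_short ['s','i','x'] r 5 hf6
    have hc9_5 : (['n','i','n','e'] == List.take 5 r) = false := pv_beq_take_short ['n','i','n','e'] r 5 hf9
    simp [h7, hf0, hf1, hf2, hf3, hf4, hf5, hf6, hf8, hf9, hc0_5, hc1_4, hc1_5, hc2_4, hc2_5, hc4_5, hc5_5, hc6_4, hc6_5, hc9_5]
  by_cases h8 : (['e','i','g','h','t'].isPrefixOf r) = true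
  ·
    have hf0 : (['z','e','r','o'].isPrefixOf r) = false := pv_excl ['e','i','g','h','t'] ['z','e','r','o'] r h8 (by decide) (by decide)
    have hf1 : (['o','n','e'].isPrefixOf r) = false := pv_excl ['e','i','g','h','t'] ['o','n','e'] r h8 (by decide) (by decide)
    have hf2 : (['t','w','o'].isPrefixOf r) = false := pv_excl ['e','i','g','h','t'] ['t','w','o'] r h8 (by decide) (by decide)
    have hf3 : (['t','h','r','e','e'].isPrefixOf r) = false := pv_excl ['e','i','g','h','t'] ['t','h','r','e','e'] r h8 (by decide) (by decide)
    have hf4 : (['f','o','u','r'].isPrefixOf r) = false := pv_excl ['e','i','g','h','t'] ['f','o','u','r'] r h8 (by decide) (by decide)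
    have hf5 : (['f','i','v','e'].isPrefixOf r) = false := pv_excl ['e','i','g','h','t'] ['f','i','v','e'] r h8 (by decide) (by decide)
    have hf6 : (['s','i','x'].isPrefixOf r) = false := pv_excl ['e','i','g','h','t'] ['s','i','x'] r h8 (by decide) (by decide)
    have hf7 : (['s','e','v','e','n'].isPrefixOf r) = false := pv_excl ['e','i','g','h','t'] ['s','e','v','e','n'] r h8 (by decide) (by decide)
    have hf9 : (['n','i','n','e'].isPrefixOf r) = false := pv_excl ['e','i','g','h','t'] ['n','i','n','e'] r h8 (by decide) (by decide)
    have hc0_5 : (['z','e','r','o'] == List.take 5 r) = false := pv_beq_take_short ['z','e','r','o'] r 5 hf0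
    have hc1_4 : (['o','n','e'] == List.take 4 r) = false := pv_beq_take_short ['o','n','e'] r 4 hf1
    have hc1_5 : (['o','n','e'] == List.take 5 r) = false := pv_beq_take_short ['o','n','e'] r 5 hf1
    have hc2_4 : (['t','w','o'] == List.take 4 r) = false := pv_beq_take_short ['t','w','o'] r 4 hf2
    have hc2_5 : (['t','w','o'] == List.take 5 r) = false := pv_beq_take_short ['t','w','o'] r 5 hf2
    have hc4_5 : (['f','o','u','r'] == List.take 5 r) = false := pv_beq_take_short ['f','o','u','r'] r 5 hf4
    have hc5_5 : (['f','i','v','e'] == List.take 5 r) = false := pv_beq_take_short ['f','i','v','e'] r 5 hf5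
    have hc6_4 : (['s','i','x'] == List.take 4 r) = false := pv_beq_take_short ['s','i','x'] r 4 hf6
    have hc6_5 : (['s','i','x'] == List.take 5 r) = false := pv_beq_take_short ['s','i','x'] r 5 hf6
    have hc9_5 : (['n','i','n','e'] == List.take 5 r) = false := pv_beq_take_short ['n','i','n','e'] r 5 hf9
    simp [h8, hf0, hf1, hf2, hf3, hf4, hf5, hf6, hf7, hf9, hc0_5, hc1_4, hc1_5, hc2_4, hc2_5, hc4_5, hc5_5, hc6_4, hc6_5, hc9_5]
  by_cases h9 : (['n','i','n','e'].isPrefixOf r) = true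
  ·
    have hf0 : (['z','e','r','o'].isPrefixOf r) = false := pv_excl ['n','i','n','e'] ['z','e','r','o'] r h9 (by decide) (by decide)
    have hf1 : (['o','n','e'].isPrefixOf r) = false := pv_excl ['n','i','n','e'] ['o','n','e'] r h9 (by decide) (by decide)
    have hf2 : (['t','w','o'].isPrefixOf r) = false := pv_excl ['n','i','n','e'] ['t','w','o'] r h9 (by decide) (by decide)
    have hf3 : (['t','h','r','e','e'].isPrefixOf r) = false := pv_excl ['n','i','n','e'] ['t','h','r','e','e'] r h9 (by decide) (by decide)
    have hf4 : (['f','o','u','r'].isPrefixOf r) = false := pv_excl ['n','i','n','e'] ['f','o','u','r'] r h9 (by decide) (by decide)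
    have hf5 : (['f','i','v','e'].isPrefixOf r) = false := pv_excl ['n','i','n','e'] ['f','i','v','e'] r h9 (by decide) (by decide)
    have hf6 : (['s','i','x'].isPrefixOf r) = false := pv_excl ['n','i','n','e'] ['s','i','x'] r h9 (by decide) (by decide)
    have hf7 : (['s','e','v','e','n'].isPrefixOf r) = false := pv_excl ['n','i','n','e'] ['s','e','v','e','n'] r h9 (by decide) (by decide)
    have hf8 : (['e','i','g','h','t'].isPrefixOf r) = false := pv_excl ['n','i','n','e'] ['e','i','g','h','t'] r h9 (by decide) (by decide)
    have hc0_5 : (['z','e','r','o'] == List.take 5 r) = false := pv_beq_take_short ['z','e','r','o'] r 5 hf0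
    have hc1_4 : (['o','n','e'] == List.take 4 r) = false := pv_beq_take_short ['o','n','e'] r 4 hf1
    have hc1_5 : (['o','n','e'] == List.take 5 r) = false := pv_beq_take_short ['o','n','e'] r 5 hf1
    have hc2_4 : (['t','w','o'] == List.take 4 r) = false := pv_beq_take_short ['t','w','o'] r 4 hf2
    have hc2_5 : (['t','w','o'] == List.take 5 r) = false := pv_beq_take_short ['t','w','o'] r 5 hf2
    have hc4_5 : (['f','o','u','r'] == List.take 5 r) = false := pv_beq_take_short ['f','o','u','r'] r 5 hf4
    have hc5_5 : (['f','i','v','e'] == List.take 5 r) = false := pv_beq_take_short ['f','i','v','e'] r 5 hf5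
    have hc6_4 : (['s','i','x'] == List.take 4 r) = false := pv_beq_take_short ['s','i','x'] r 4 hf6
    have hc6_5 : (['s','i','x'] == List.take 5 r) = false := pv_beq_take_short ['s','i','x'] r 5 hf6
    simp [h9, hf0, hf1, hf2, hf3, hf4, hf5, hf6, hf7, hf8, hc0_5, hc1_4, hc1_5, hc2_4, hc2_5, hc4_5, hc5_5, hc6_4, hc6_5]
  have hf0 : (['z','e','r','o'].isPrefixOf r) = false := Bool.eq_false_iff.mpr h0
  have hf1 : (['o','n','e'].isPrefixOf r) = false := Bool.eq_false_iff.mpr h1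
  have hf2 : (['t','w','o'].isPrefixOf r) = false := Bool.eq_false_iff.mpr h2
  have hf3 : (['t','h','r','e','e'].isPrefixOf r) = false := Bool.eq_false_iff.mpr h3
  have hf4 : (['f','o','u','r'].isPrefixOf r) = false := Bool.eq_false_iff.mpr h4
  have hf5 : (['f','i','v','e'].isPrefixOf r) = false := Bool.eq_false_iff.mpr h5
  have hf6 : (['s','i','x'].isPrefixOf r) = false := Bool.eq_false_iff.mpr h6
  have hf7 : (['s','e','v','e','n'].isPrefixOf r) = false := Bool.eq_false_iff.mpr h7
  have hf8 : (['e','i','g','h','t'].isPrefixOf r) = false := Bool.eq_false_iff.mpr h8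
  have hf9 : (['n','i','n','e'].isPrefixOf r) = false := Bool.eq_false_iff.mpr h9
  have hc0_5 : (['z','e','r','o'] == List.take 5 r) = false := pv_beq_take_short ['z','e','r','o'] r 5 hf0
  have hc1_4 : (['o','n','e'] == List.take 4 r) = false := pv_beq_take_short ['o','n','e'] r 4 hf1
  have hc1_5 : (['o','n','e'] == List.take 5 r) = false := pv_beq_take_short ['o','n','e'] r 5 hf1
  have hc2_4 : (['t','w','o'] == List.take 4 r) = false := pv_beq_take_short ['t','w','o'] r 4 hf2
  have hc2_5 : (['t','w','o'] == List.take 5 r) = false := pv_beq_take_short ['t','w','o'] r 5 hf2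
  have hc4_5 : (['f','o','u','r'] == List.take 5 r) = false := pv_beq_take_short ['f','o','u','r'] r 5 hf4
  have hc5_5 : (['f','i','v','e'] == List.take 5 r) = false := pv_beq_take_short ['f','i','v','e'] r 5 hf5
  have hc6_4 : (['s','i','x'] == List.take 4 r) = false := pv_beq_take_short ['s','i','x'] r 4 hf6
  have hc6_5 : (['s','i','x'] == List.take 5 r) = false := pv_beq_take_short ['s','i','x'] r 5 hf6
  have hc9_5 : (['n','i','n','e'] == List.take 5 r) = false := pv_beq_take_short ['n','i','n','e'] r 5 hf9
  simp [hf0, hf1, hf2, hf3, hf4, hf5, hf6, hf7, hf8, hf9, hc0_5, hc1_4, hc1_5, hc2_4, hc2_5, hc4_5, hc5_5, hc6_4, hc6_5, hc9_5]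

-- ===== VERDICT (by name: the statement is the Claim_ definition above) =====
theorem find_number_at_index_spec : Claim_equal_find_number_at_index := by
  intro s k _
  show _ = _
  unfold find_number_at_index find_number_at_index_alt
  rw [pvLoopA_eq_chainA, PySem.List.slice_some_none]
  set r := (PySem.Chars.lower s.toList).drop
      (PySem.List.clampIdx (PySem.Chars.lower s.toList).length k) with hr
  simp only [pvLoopB]
  have e3 : PySem.List.slice r none (some (3:Int)) = r.take 3 := by
    rw [PySem.List.slice_to]
    · rfl
    · norm_num
  have e4 : PySem.List.slice r none (some (4:Int)) = r.take 4 := by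
    rw [PySem.List.slice_to]
    · rfl
    · norm_num
  have e5 : PySem.List.slice r none (some (5:Int)) = r.take 5 := by
    rw [PySem.List.slice_to]
    · rfl
    · norm_num
  rw [e3, e4, e5]
  exact pv_core r
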